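-- pv_equiv track=rewrite | github.com/ayushamahajan24/verifyx-backend | all_test2.py | compute_verdict_from_factchecks
-- ===== SOURCE A (Python) =====
-- def compute_verdict_from_factchecks(factchecks):
--     if not factchecks:
--         return "UNVERIFIED"
--     verdicts = []
--     for fc in factchecks:
--         for r in fc.get("claimReview", []):
--             rating = (r.get("textualRating") or "").upper()
--             if "FALSE" in rating:
--                 verdicts.append("FALSE")
--             elif "TRUE" in rating:
--                 verdicts.append("TRUE")
--             elif "MISLEADING" in rating:
--                 verdicts.append("MISLEADING")
--             elif "PARTLY" in rating:
--                 verdicts.append("PARTLY TRUE")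
--     if "FALSE" in verdicts:
--         return "FALSE"
--     if "TRUE" in verdicts:
--         return "TRUE"
--     if "MISLEADING" in verdicts:
--         return "MISLEADING"
--     if "PARTLY TRUE" in verdicts:
--         return "PARTLY TRUE"
--     return "UNVERIFIED"
-- ===== SOURCE B (Python) =====
-- _LABELS = ("FALSE", "TRUE", "MISLEADING", "PARTLY TRUE")
--
-- def _rank(rating):
--     # priority rank of a textualRating, 4 = no match
--     if "FALSE" in rating:
--         return 0
--     if "TRUE" in rating:
--         return 1
--     if "MISLEADING" in rating:
--         return 2
--     if "PARTLY" in rating: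
--         return 3
--     return 4
--
-- def compute_verdict_from_factchecks(factchecks):
--     best = 4
--     for fc in factchecks:
--         for r in fc.get("claimReview", []):
--             rating = (r.get("textualRating") or "").upper()
--             best = min(best, _rank(rating))
--     return _LABELS[best] if best < 4 else "UNVERIFIED"
-- ===== Notes on version B (the rewrite author's own statement) =====
-- stated objective: simpler
-- what changed: Replaces the intermediate verdicts list and the trailing four membership scans with a single running minimum of each rating's priority rank, mapped back to its label at the end.
import Mathlib
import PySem

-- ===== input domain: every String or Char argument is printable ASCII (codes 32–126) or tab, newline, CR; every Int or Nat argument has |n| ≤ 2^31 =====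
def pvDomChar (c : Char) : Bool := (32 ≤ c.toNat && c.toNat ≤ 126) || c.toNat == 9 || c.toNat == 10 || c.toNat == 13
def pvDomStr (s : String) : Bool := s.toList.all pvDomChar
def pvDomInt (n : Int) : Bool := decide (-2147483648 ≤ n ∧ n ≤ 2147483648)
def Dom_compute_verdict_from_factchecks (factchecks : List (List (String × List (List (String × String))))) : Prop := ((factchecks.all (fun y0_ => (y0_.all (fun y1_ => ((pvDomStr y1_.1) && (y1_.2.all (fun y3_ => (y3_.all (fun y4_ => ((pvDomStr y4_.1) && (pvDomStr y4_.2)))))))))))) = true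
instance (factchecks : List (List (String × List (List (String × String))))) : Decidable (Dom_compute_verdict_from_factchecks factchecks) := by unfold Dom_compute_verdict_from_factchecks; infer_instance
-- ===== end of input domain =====

-- B replaces A's intermediate verdicts list + four trailing membership scans by a
-- running minimum priority rank mapped back to its label: simpler, same one nested pass.


-- ===== PORT A =====
-- append the matched label for one rating (the if/elif chain of A's inner loop body)
def cvffRate (rating : String) (vs : List String) : List String :=
  if PySem.Str.isIn "FALSE" rating then vs ++ ["FALSE"]
  else if PySem.Str.isIn "TRUE" rating then vs ++ ["TRUE"]
  else if PySem.Str.isIn "MISLEADING" rating then vs ++ ["MISLEADING"]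
  else if PySem.Str.isIn "PARTLY" rating then vs ++ ["PARTLY TRUE"]
  else vs

def compute_verdict_from_factchecks (factchecks : List (List (String × List (List (String × String))))) : String :=
  if factchecks = [] then "UNVERIFIED"
  else
    let verdicts := factchecks.foldl (fun vs fc =>
      ((PySem.Dict.mk fc).getD "claimReview" []).foldl (fun vs r =>
        let rating := PySem.Str.upper ((PySem.Dict.mk r).getD "textualRating" "")
        cvffRate rating vs) vs) []
    if verdicts.contains "FALSE" then "FALSE"
    else if verdicts.contains "TRUE" then "TRUE"
    else if verdicts.contains "MISLEADING" then "MISLEADING"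
    else if verdicts.contains "PARTLY TRUE" then "PARTLY TRUE"
    else "UNVERIFIED"

-- ===== PORT B =====
-- priority rank of one rating (Source B's _rank); 4 = no match
def cvffRank (rating : String) : Nat :=
  if PySem.Str.isIn "FALSE" rating then 0
  else if PySem.Str.isIn "TRUE" rating then 1
  else if PySem.Str.isIn "MISLEADING" rating then 2
  else if PySem.Str.isIn "PARTLY" rating then 3
  else 4

-- Source B's _LABELS[best] / "UNVERIFIED" lookup
def cvffLabel (m : Nat) : String :=
  match m with
  | 0 => "FALSE"
  | 1 => "TRUE"
  | 2 => "MISLEADING"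
  | 3 => "PARTLY TRUE"
  | _ => "UNVERIFIED"

def compute_verdict_from_factchecks_alt (factchecks : List (List (String × List (List (String × String))))) : String :=
  let best := factchecks.foldl (fun m fc =>
    ((PySem.Dict.mk fc).getD "claimReview" []).foldl (fun m r =>
      min m (cvffRank (PySem.Str.upper ((PySem.Dict.mk r).getD "textualRating" "")))) m) 4
  if best < 4 then cvffLabel best else "UNVERIFIED"

-- ===== PRECONDITION & SPEC =====
def Spec_compute_verdict_from_factchecks (factchecks : List (List (String × List (List (String × String))))) (out : String) : Prop := out = compute_verdict_from_factchecks_alt factchecks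
instance (factchecks : List (List (String × List (List (String × String))))) (out : String) : Decidable (Spec_compute_verdict_from_factchecks factchecks out) := by unfold Spec_compute_verdict_from_factchecks; infer_instance

-- ===== CLAIM (what is proved, stated in full; the proofs are below) =====
def Claim_equal_compute_verdict_from_factchecks : Prop := ∀ (factchecks : List (List (String × List (List (String × String))))), Dom_compute_verdict_from_factchecks factchecks → Spec_compute_verdict_from_factchecks factchecks (compute_verdict_from_factchecks factchecks)

-- ===== LEMMAS AND PROOFS =====

-- invariant linking A's verdicts list vs with B's running minimum m
def CvffR (vs : List String) (m : Nat) : Prop :=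
  m ≤ 4
  ∧ (m = 0 ↔ "FALSE" ∈ vs)
  ∧ (m = 1 ↔ ("TRUE" ∈ vs ∧ "FALSE" ∉ vs))
  ∧ (m = 2 ↔ ("MISLEADING" ∈ vs ∧ "TRUE" ∉ vs ∧ "FALSE" ∉ vs))
  ∧ (m = 3 ↔ ("PARTLY TRUE" ∈ vs ∧ "MISLEADING" ∉ vs ∧ "TRUE" ∉ vs ∧ "FALSE" ∉ vs))

theorem cvffR_step (rating : String) (vs : List String) (m : Nat) (h : CvffR vs m) :
    CvffR (cvffRate rating vs) (min m (cvffRank rating)) := by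
  obtain ⟨h4, h0, h1, h2, h3⟩ := h
  unfold cvffRate cvffRank CvffR
  split_ifs <;>
    by_cases hF : "FALSE" ∈ vs <;> by_cases hT : "TRUE" ∈ vs <;>
    by_cases hM : "MISLEADING" ∈ vs <;> by_cases hP : "PARTLY TRUE" ∈ vs <;>
    simp_all [List.mem_append] <;> omega

theorem cvffR_final (vs : List String) (m : Nat) (h : CvffR vs m) :
    (if vs.contains "FALSE" then "FALSE"
     else if vs.contains "TRUE" then "TRUE"
     else if vs.contains "MISLEADING" then "MISLEADING"
     else if vs.contains "PARTLY TRUE" then "PARTLY TRUE"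
     else "UNVERIFIED") =
    (if m < 4 then cvffLabel m else "UNVERIFIED") := by
  obtain ⟨h4, h0, h1, h2, h3⟩ := h
  simp only [List.contains_eq_mem]
  interval_cases m <;>
    by_cases hF : "FALSE" ∈ vs <;> by_cases hT : "TRUE" ∈ vs <;>
    by_cases hM : "MISLEADING" ∈ vs <;> by_cases hP : "PARTLY TRUE" ∈ vs <;>
    simp_all [cvffLabel]

theorem cvffR_inner (l : List (List (String × String))) (vs : List String) (m : Nat) (h : CvffR vs m) :
    CvffR (l.foldl (fun vs r => cvffRate (PySem.Str.upper ((PySem.Dict.mk r).getD "textualRating" "")) vs) vs)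
          (l.foldl (fun m r => min m (cvffRank (PySem.Str.upper ((PySem.Dict.mk r).getD "textualRating" "")))) m) := by
  induction l generalizing vs m with
  | nil => exact h
  | cons r t ih => exact ih _ _ (cvffR_step _ _ _ h)

theorem cvffR_outer (l : List (List (String × List (List (String × String))))) (vs : List String) (m : Nat) (h : CvffR vs m) :
    CvffR (l.foldl (fun vs fc => ((PySem.Dict.mk fc).getD "claimReview" []).foldl (fun vs r => cvffRate (PySem.Str.upper ((PySem.Dict.mk r).getD "textualRating" "")) vs) vs) vs)
          (l.foldl (fun m fc => ((PySem.Dict.mk fc).getD "claimReview" []).foldl (fun m r => min m (cvffRank (PySem.Str.upper ((PySem.Dict.mk r).getD "textualRating" "")))) m) m) := by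
  induction l generalizing vs m with
  | nil => exact h
  | cons fc t ih => exact ih _ _ (cvffR_inner _ _ _ h)

-- ===== VERDICT (by name: the statement is the Claim_ definition above) =====
theorem compute_verdict_from_factchecks_spec : Claim_equal_compute_verdict_from_factchecks := by
  intro fcs _
  unfold Spec_compute_verdict_from_factchecks compute_verdict_from_factchecks compute_verdict_from_factchecks_alt
  rcases fcs with _ | ⟨fc, t⟩
  · rfl
  · simp only [reduceCtorEq, if_false]
    exact cvffR_final _ _ (cvffR_outer (fc :: t) [] 4 ⟨by omega, by simp, by simp, by simp, by simp⟩)
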